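-- pv_equiv track=rewrite | github.com/InSARdev/core | insardev/insardev/utils_dask.py | get_aligned_chunk_size
-- ===== SOURCE A (Python) =====
-- def get_aligned_chunk_size(original_chunk: int, target_bytes: int, element_bytes: int,
--                            other_dims_size: int = 1, min_chunk: int = 256) -> int:
--     """
--     Calculate aligned chunk size that divides evenly into original chunk.
--
--     Uses power-of-2 divisions (//2, //4, //8, ...) to ensure new chunks align
--     perfectly with original chunk boundaries, avoiding inefficient overlapping
--     chunks that degrade dask performance.
--
--     Parameters
--     ----------
--     original_chunk : int
--         Original chunk size in pixels for this dimension.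
--     target_bytes : int
--         Target memory per chunk in bytes.
--     element_bytes : int
--         Bytes per element (e.g., 8 for complex64, 4 for float32).
--     other_dims_size : int
--         Product of sizes of other dimensions in the chunk (e.g., n_dates * other_spatial).
--     min_chunk : int
--         Minimum chunk size (default 256).
--
--     Returns
--     -------
--     int
--         Aligned chunk size that divides evenly into original_chunk.
--
--     Examples
--     --------
--     >>> # Original 4096 chunk, need smaller for memory
--     >>> get_aligned_chunk_size(4096, 256*1024*1024, 8, other_dims_size=5*4096)
--     2048  # Returns 2048 (4096//2) if it fits, else 1024 (4096//4), etc.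
--     """
--     # Calculate maximum chunk size that fits in target memory
--     # chunk_y * other_dims_size * element_bytes <= target_bytes
--     max_chunk = target_bytes // (other_dims_size * element_bytes)
--     max_chunk = max(min_chunk, max_chunk)
--
--     # If original chunk already fits, use it
--     if original_chunk <= max_chunk:
--         return original_chunk
--
--     # Find largest power-of-2 division that fits
--     # Try //2, //4, //8, //16, ... until it fits or hits min_chunk
--     divisor = 2
--     while True:
--         candidate = original_chunk // divisor
--         if candidate <= max_chunk:
--             return max(min_chunk, candidate)
--         if candidate <= min_chunk:
--             return min_chunk
--         divisor *= 2
-- ===== SOURCE B (Python) =====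
-- def get_aligned_chunk_size(original_chunk: int, target_bytes: int, element_bytes: int,
--                            other_dims_size: int = 1, min_chunk: int = 256) -> int:
--     max_chunk = max(min_chunk, target_bytes // (other_dims_size * element_bytes))
--     if original_chunk <= max_chunk:
--         return original_chunk
--     # smallest power-of-2 divisor d >= 2 with original_chunk // d <= max_chunk,
--     # via original_chunk // d <= max_chunk  <=>  original_chunk // (max_chunk+1) < d
--     q = original_chunk // (max_chunk + 1)
--     d = 1 << max(1, q.bit_length())
--     return max(min_chunk, original_chunk // d)
-- ===== Notes on version B (the rewrite author's own statement) =====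
-- stated objective: alternative
-- what changed: Replaced A's divisor-doubling while-loop with a closed-form bit-length computation of the power-of-2 divisor from original_chunk // (max_chunk + 1) (loop-free arithmetic; both are already fast, so no measurable speedup).
import Mathlib
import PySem

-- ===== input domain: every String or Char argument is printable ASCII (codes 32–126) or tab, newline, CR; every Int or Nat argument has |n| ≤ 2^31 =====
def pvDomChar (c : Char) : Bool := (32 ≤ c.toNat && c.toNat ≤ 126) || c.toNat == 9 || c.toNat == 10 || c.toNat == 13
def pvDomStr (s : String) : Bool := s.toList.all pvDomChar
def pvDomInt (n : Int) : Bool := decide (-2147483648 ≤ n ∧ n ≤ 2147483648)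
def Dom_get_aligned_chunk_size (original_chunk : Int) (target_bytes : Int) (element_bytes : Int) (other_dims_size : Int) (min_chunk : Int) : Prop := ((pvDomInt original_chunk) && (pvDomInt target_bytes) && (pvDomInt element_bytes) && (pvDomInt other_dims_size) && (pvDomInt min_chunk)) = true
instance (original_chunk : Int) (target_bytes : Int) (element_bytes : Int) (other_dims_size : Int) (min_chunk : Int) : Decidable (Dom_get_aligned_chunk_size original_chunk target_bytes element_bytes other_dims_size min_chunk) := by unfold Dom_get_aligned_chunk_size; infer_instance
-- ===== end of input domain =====

-- B replaces A's divisor-doubling loop with a closed-form bit-length computation of the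
-- power-of-2 divisor (objective: alternative, loop-free arithmetic instead of the doubling loop).


-- ===== PORT A =====
-- A's `while True` loop; the fuel only makes it total (64 > any step count reached inside
-- Pre_, where the loop terminates; fuel exhaustion is never hit there).
def gacsLoop (original_chunk : Int) (max_chunk : Int) (min_chunk : Int) (divisor : Int) : Nat → Int
  | 0 => min_chunk
  | fuel + 1 =>
    let candidate := PySem.Int.floordiv original_chunk divisor
    if candidate ≤ max_chunk then max min_chunk candidate
    else if candidate ≤ min_chunk then min_chunk
    else gacsLoop original_chunk max_chunk min_chunk (divisor * 2) fuel

def get_aligned_chunk_size (original_chunk : Int) (target_bytes : Int) (element_bytes : Int) (other_dims_size : Int) (min_chunk : Int) : Int :=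
  let max_chunk := PySem.Int.floordiv target_bytes (other_dims_size * element_bytes)
  let max_chunk := max min_chunk max_chunk
  if original_chunk ≤ max_chunk then original_chunk
  else gacsLoop original_chunk max_chunk min_chunk 2 64

-- ===== PORT B =====
def get_aligned_chunk_size_alt (original_chunk : Int) (target_bytes : Int) (element_bytes : Int) (other_dims_size : Int) (min_chunk : Int) : Int :=
  let max_chunk := max min_chunk (PySem.Int.floordiv target_bytes (other_dims_size * element_bytes))
  if original_chunk ≤ max_chunk then original_chunk
  else
    let q := PySem.Int.floordiv original_chunk (max_chunk + 1)
    let d := (1 : Int) <<< (max 1 (PySem.Int.bitLength q))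
    max min_chunk (PySem.Int.floordiv original_chunk d)

-- ===== PRECONDITION & SPEC =====
-- Pre_ excludes exactly the inputs where A does not return: other_dims_size * element_bytes = 0
-- (ZeroDivisionError) and inputs whose max_chunk is negative while original_chunk exceeds it,
-- on which A's halving loop never terminates.
def Pre_get_aligned_chunk_size (original_chunk : Int) (target_bytes : Int) (element_bytes : Int) (other_dims_size : Int) (min_chunk : Int) : Prop :=
  other_dims_size * element_bytes ≠ 0 ∧
  (original_chunk ≤ max min_chunk (PySem.Int.floordiv target_bytes (other_dims_size * element_bytes)) ∨
   0 ≤ max min_chunk (PySem.Int.floordiv target_bytes (other_dims_size * element_bytes)))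
instance (original_chunk : Int) (target_bytes : Int) (element_bytes : Int) (other_dims_size : Int) (min_chunk : Int) : Decidable (Pre_get_aligned_chunk_size original_chunk target_bytes element_bytes other_dims_size min_chunk) := by unfold Pre_get_aligned_chunk_size; infer_instance

def pvWitness_get_aligned_chunk_size : Int × Int × Int × Int × Int := (4096, 268435456, 8, 20480, 256)

def Spec_get_aligned_chunk_size (original_chunk : Int) (target_bytes : Int) (element_bytes : Int) (other_dims_size : Int) (min_chunk : Int) (out : Int) : Prop := out = get_aligned_chunk_size_alt original_chunk target_bytes element_bytes other_dims_size min_chunk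
instance (original_chunk : Int) (target_bytes : Int) (element_bytes : Int) (other_dims_size : Int) (min_chunk : Int) (out : Int) : Decidable (Spec_get_aligned_chunk_size original_chunk target_bytes element_bytes other_dims_size min_chunk out) := by unfold Spec_get_aligned_chunk_size; infer_instance

-- ===== CLAIM (what is proved, stated in full; the proofs are below) =====
def Claim_equal_get_aligned_chunk_size : Prop := ∀ (original_chunk : Int) (target_bytes : Int) (element_bytes : Int) (other_dims_size : Int) (min_chunk : Int), Dom_get_aligned_chunk_size original_chunk target_bytes element_bytes other_dims_size min_chunk → Pre_get_aligned_chunk_size original_chunk target_bytes element_bytes other_dims_size min_chunk → Spec_get_aligned_chunk_size original_chunk target_bytes element_bytes other_dims_size min_chunk (get_aligned_chunk_size original_chunk target_bytes element_bytes other_dims_size min_chunk)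

-- ===== LEMMAS AND PROOFS =====

-- q = original_chunk // (M+1) is at least 1 when M < original_chunk, 0 ≤ M
theorem gacs_q_pos (orig M : Int) (hM : 0 ≤ M) (ho : M < orig) :
    1 ≤ PySem.Int.floordiv orig (M + 1) := by
  rw [PySem.Int.le_floordiv_iff_mul_le (show (0:Int) < M + 1 by omega)]
  omega

-- the test `orig // 2^k ≤ M` fires exactly for k ≥ bitLength q
theorem gacs_cond (orig M : Int) (hM : 0 ≤ M) (ho : M < orig) (k : Nat) :
    (PySem.Int.floordiv orig ((2 : Int) ^ k) ≤ M ↔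
      PySem.Int.bitLength (PySem.Int.floordiv orig (M + 1)) ≤ k) := by
  have hq1 := gacs_q_pos orig M hM ho
  set q := PySem.Int.floordiv orig (M + 1) with hq
  have h2k : (0 : Int) < 2 ^ k := by positivity
  have hqabs : (q.natAbs : Int) = q := Int.natAbs_of_nonneg (by omega)
  have h2 : q < 2 ^ k ↔ orig < 2 ^ k * (M + 1) :=
    PySem.Int.floordiv_lt_iff_lt_mul (show (0:Int) < M + 1 by omega)
  have h3 : q < 2 ^ k ↔ PySem.Int.bitLength q ≤ k := by
    constructor
    · intro h
      by_contra hk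
      push Not at hk
      have hle : (2 : Nat) ^ k ≤ q.natAbs :=
        le_trans (Nat.pow_le_pow_right (by norm_num) (by omega))
          (PySem.Int.two_pow_bitLength_le q (by omega))
      have hle' : ((2 : Nat) ^ k : Int) ≤ (q.natAbs : Int) := by exact_mod_cast hle
      rw [hqabs] at hle'
      push_cast at hle'
      linarith
    · intro h
      have hlt : q.natAbs < 2 ^ k :=
        lt_of_lt_of_le (PySem.Int.lt_two_pow_bitLength q) (Nat.pow_le_pow_right (by norm_num) h)
      have hlt' : ((q.natAbs : Int)) < ((2 : Nat) ^ k : Int) := by exact_mod_cast hlt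
      rw [hqabs] at hlt'
      push_cast at hlt'
      linarith
  constructor
  · intro h
    have h4 : orig < (M + 1) * 2 ^ k :=
      (PySem.Int.floordiv_lt_iff_lt_mul h2k).mp (by omega)
    exact h3.mp (h2.mpr (by rw [mul_comm ((2:Int)^k) (M+1)]; exact h4))
  · intro h
    have h4 : orig < 2 ^ k * (M + 1) := h2.mp (h3.mpr h)
    have h5 := (PySem.Int.floordiv_lt_iff_lt_mul h2k).mpr
      (show orig < (M + 1) * 2 ^ k by rw [mul_comm (M+1) ((2:Int)^k)]; exact h4)
    omega

theorem gacs_loop_eq (orig M minc : Int) (hM : 0 ≤ M) (hminc : minc ≤ M) (ho : M < orig) :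
    ∀ (fuel k : Nat), 1 ≤ k → k ≤ PySem.Int.bitLength (PySem.Int.floordiv orig (M + 1)) →
      PySem.Int.bitLength (PySem.Int.floordiv orig (M + 1)) < k + fuel →
      gacsLoop orig M minc ((2 : Int) ^ k) fuel =
        max minc (PySem.Int.floordiv orig ((2 : Int) ^ PySem.Int.bitLength (PySem.Int.floordiv orig (M + 1)))) := by
  intro fuel
  induction fuel with
  | zero => intro k hk1 hke hkf; omega
  | succ f ih =>
    intro k hk1 hke hkf
    simp only [gacsLoop]
    by_cases hc : PySem.Int.floordiv orig ((2 : Int) ^ k) ≤ M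
    · have he : PySem.Int.bitLength (PySem.Int.floordiv orig (M + 1)) = k := by
        have := (gacs_cond orig M hM ho k).mp hc
        omega
      rw [if_pos hc, he]
    · have hgt : M < PySem.Int.floordiv orig ((2 : Int) ^ k) := by omega
      rw [if_neg hc, if_neg (by omega)]
      have hpow : (2 : Int) ^ k * 2 = (2 : Int) ^ (k + 1) := by ring
      rw [hpow]
      have hke' : k + 1 ≤ PySem.Int.bitLength (PySem.Int.floordiv orig (M + 1)) := by
        have := (gacs_cond orig M hM ho k).mpr
        by_contra h
        exact hc (this (by omega))
      exact ih (k + 1) (by omega) hke' (by omega)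

-- bitLength of the quotient is small on the bounded domain
theorem gacs_bitLength_le (orig M : Int) (hM : 0 ≤ M) (ho : M < orig) (hb : orig ≤ 2147483648) :
    PySem.Int.bitLength (PySem.Int.floordiv orig (M + 1)) ≤ 32 := by
  have hq1 := gacs_q_pos orig M hM ho
  set q := PySem.Int.floordiv orig (M + 1) with hq
  have hqle : q ≤ orig := by
    have := (PySem.Int.floordiv_lt_iff_lt_mul (show (0:Int) < M + 1 by omega)).mpr
      (show orig < (orig + 1) * (M + 1) by nlinarith)
    omega
  by_contra h
  push Not at h
  have h3 : (2 : Nat) ^ 32 ≤ q.natAbs :=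
    le_trans (Nat.pow_le_pow_right (by norm_num) (by omega))
      (PySem.Int.two_pow_bitLength_le q (by omega))
  have h4 : ((2 : Nat) ^ 32 : Int) ≤ (q.natAbs : Int) := by exact_mod_cast h3
  have hqabs : (q.natAbs : Int) = q := Int.natAbs_of_nonneg (by omega)
  rw [hqabs] at h4
  norm_num at h4
  omega

theorem gacs_bitLength_pos (q : Int) (hq : 1 ≤ q) : 1 ≤ PySem.Int.bitLength q := by
  by_contra h
  push Not at h
  have hlt := PySem.Int.lt_two_pow_bitLength q
  interval_cases hbl : PySem.Int.bitLength q
  · simp at hlt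
    omega

theorem int_one_shiftLeft (k : Nat) : (1 : Int) <<< k = (2 : Int) ^ k := by
  rw [Int.shiftLeft_eq]
  ring

-- ===== VERDICT (by name: the statement is the Claim_ definition above) =====
theorem get_aligned_chunk_size_spec : Claim_equal_get_aligned_chunk_size := by
  intro orig tb eb ods minc hDom hPre
  unfold Spec_get_aligned_chunk_size get_aligned_chunk_size get_aligned_chunk_size_alt
  simp only []
  set M := max minc (PySem.Int.floordiv tb (ods * eb)) with hMdef
  by_cases h : orig ≤ M
  · rw [if_pos h, if_pos h]
  · rw [if_neg h, if_neg h]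
    obtain ⟨hd0, hcase⟩ := hPre
    have hM0 : 0 ≤ M := by
      rcases hcase with hc | hc
      · exact absurd hc h
      · exact hc
    have ho : M < orig := by omega
    have hminc : minc ≤ M := le_max_left _ _
    have hq1 := gacs_q_pos orig M hM0 ho
    have he1 := gacs_bitLength_pos _ hq1
    have hmax : max 1 (PySem.Int.bitLength (PySem.Int.floordiv orig (M + 1))) =
        PySem.Int.bitLength (PySem.Int.floordiv orig (M + 1)) := by omega
    have hbd : orig ≤ 2147483648 := by
      unfold Dom_get_aligned_chunk_size pvDomInt at hDom
      simp only [Bool.and_eq_true, decide_eq_true_eq] at hDom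
      exact hDom.1.1.1.1.2
    have hele := gacs_bitLength_le orig M hM0 ho hbd
    rw [hmax, int_one_shiftLeft]
    have := gacs_loop_eq orig M minc hM0 hminc ho 64 1 (by omega) (by omega) (by omega)
    simpa using this
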